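-- pv_equiv track=rewrite | github.com/shalom2552/IntroToDataScience | HW1/part1/main.py | split_by_value
-- ===== SOURCE A (Python) =====
-- def split_by_value(data, value):
-- 	dict1={}
-- 	dict2={}
-- 	length = len(data['t1'])
-- 	for key in data:
-- 		dict1[key] =[]
-- 		dict2[key]=[]
-- 	for n in range(length):
-- 		if data['t1'][n] <= value:
-- 			for key in data:
-- 				dict1[key].append(data[key][n])
-- 		else:
-- 			for key in data:
-- 				dict2[key].append(data[key][n])
-- 	return dict1, dict2
-- ===== SOURCE B (Python) =====
-- def split_by_value(data, value):
--     t1 = data['t1']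
--     idx1 = [i for i, v in enumerate(t1) if v <= value]
--     idx2 = [i for i, v in enumerate(t1) if v > value]
--     dict1 = {key: [col[i] for i in idx1] for key, col in data.items()}
--     dict2 = {key: [col[i] for i in idx2] for key, col in data.items()}
--     return dict1, dict2
-- ===== Notes on version B (the rewrite author's own statement) =====
-- stated objective: simpler
-- what changed: Replaces the row-by-row append loop over mutable per-key lists with a precomputed index partition of t1 and per-column list comprehensions (column-major selection).
import Mathlib
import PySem

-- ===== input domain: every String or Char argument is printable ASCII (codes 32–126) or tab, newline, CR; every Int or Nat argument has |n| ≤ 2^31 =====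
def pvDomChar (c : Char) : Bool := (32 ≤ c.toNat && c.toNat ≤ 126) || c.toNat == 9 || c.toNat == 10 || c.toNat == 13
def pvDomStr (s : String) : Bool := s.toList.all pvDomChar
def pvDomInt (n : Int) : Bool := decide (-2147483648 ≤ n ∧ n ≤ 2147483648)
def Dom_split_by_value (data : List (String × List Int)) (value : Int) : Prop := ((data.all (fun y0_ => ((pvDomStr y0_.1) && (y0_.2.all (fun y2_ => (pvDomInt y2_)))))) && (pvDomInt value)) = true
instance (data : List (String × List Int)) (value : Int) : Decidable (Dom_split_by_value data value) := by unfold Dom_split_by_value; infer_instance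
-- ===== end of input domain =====

-- B replaces A's row-by-row append loop with a precomputed index partition of t1 and
-- per-column selection (simpler, column-major); same return value, no observable mutation.

-- ===== PORT A =====
def split_by_value (data : List (String × List Int)) (value : Int) : (List (String × List Int)) × (List (String × List Int)) :=
  let d : PySem.Dict String (List Int) := PySem.Dict.ofList data
  let t1 : List Int := (d.get? "t1").getD []          -- data['t1'] (KeyError excluded by Pre_)
  let length : Int := t1.length
  let dict1 : PySem.Dict String (List Int) :=
    d.items.foldl (fun d1 kv => d1.insert kv.1 ([] : List Int)) PySem.Dict.empty
  let dict2 : PySem.Dict String (List Int) :=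
    d.items.foldl (fun d2 kv => d2.insert kv.1 ([] : List Int)) PySem.Dict.empty
  let res :=
    (PySem.List.pyRange 0 length 1).foldl
      (fun (p : PySem.Dict String (List Int) × PySem.Dict String (List Int)) n =>
        if PySem.List.pyGetD t1 n 0 ≤ value then
          (d.items.foldl (fun d1 kv => d1.modify kv.1 [] (fun l => l ++ [PySem.List.pyGetD kv.2 n 0])) p.1, p.2)
        else
          (p.1, d.items.foldl (fun d2 kv => d2.modify kv.1 [] (fun l => l ++ [PySem.List.pyGetD kv.2 n 0])) p.2))
      (dict1, dict2)
  (res.1.items, res.2.items)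

-- ===== PORT B =====
def split_by_value_alt (data : List (String × List Int)) (value : Int) : (List (String × List Int)) × (List (String × List Int)) :=
  let d : PySem.Dict String (List Int) := PySem.Dict.ofList data
  let t1 : List Int := (d.get? "t1").getD []          -- data['t1'] (KeyError excluded by Pre_)
  let idx1 : List Int := ((PySem.List.enumerate t1).filter (fun p => p.2 ≤ value)).map (·.1)
  let idx2 : List Int := ((PySem.List.enumerate t1).filter (fun p => value < p.2)).map (·.1)
  (d.items.map (fun kv => (kv.1, idx1.map (fun i => PySem.List.pyGetD kv.2 i 0))),
   d.items.map (fun kv => (kv.1, idx2.map (fun i => PySem.List.pyGetD kv.2 i 0))))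

-- ===== PRECONDITION & SPEC =====
-- Pre_ excludes exactly the inputs where Python A raises: a missing 't1' key (KeyError) and
-- any column shorter than the 't1' column (IndexError while appending row values).
def Pre_split_by_value (data : List (String × List Int)) (value : Int) : Prop :=
  let d : PySem.Dict String (List Int) := PySem.Dict.ofList data
  d.contains "t1" = true ∧ ∀ col ∈ d.values, (d.getD "t1" []).length ≤ col.length
instance (data : List (String × List Int)) (value : Int) : Decidable (Pre_split_by_value data value) := by unfold Pre_split_by_value; infer_instance
def pvWitness_split_by_value : (List (String × List Int)) × Int := ([("t1", [1, 3]), ("x", [5, 6])], 2)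

def Spec_split_by_value (data : List (String × List Int)) (value : Int) (out : (List (String × List Int)) × (List (String × List Int))) : Prop := out = split_by_value_alt data value
instance (data : List (String × List Int)) (value : Int) (out : (List (String × List Int)) × (List (String × List Int))) : Decidable (Spec_split_by_value data value out) := by unfold Spec_split_by_value; infer_instance

-- ===== CLAIM (what is proved, stated in full; the proofs are below) =====
def Claim_equal_split_by_value : Prop := ∀ (data : List (String × List Int)) (value : Int), Dom_split_by_value data value → Pre_split_by_value data value → Spec_split_by_value data value (split_by_value data value)

-- ===== LEMMAS AND PROOFS =====

-- with unique keys, filtering an assoc list by a present key yields its unique pair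
lemma filter_key_eq {α : Type} (its : List (String × α)) (k : String) (col : α)
    (hnd : (its.map Prod.fst).Nodup) (hmem : (k, col) ∈ its) :
    its.filter (fun p => p.1 == k) = [(k, col)] := by
  induction its with
  | nil => cases hmem
  | cons hd tl ih =>
    simp only [List.map_cons, List.nodup_cons] at hnd
    rcases List.mem_cons.1 hmem with h | h
    · subst h
      simp only [List.filter_cons, beq_self_eq_true, if_pos]
      have : tl.filter (fun p => p.1 == k) = [] := by
        apply List.filter_eq_nil_iff.2
        intro p hp
        simp only [beq_iff_eq]
        intro hpk
        have hm : p.1 ∈ tl.map Prod.fst := List.mem_map_of_mem hp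
        rw [hpk] at hm
        exact hnd.1 hm
      simp [this]
    · have hne : hd.1 ≠ k := by
        intro he
        exact hnd.1 (he ▸ List.mem_map_of_mem h)
      simp only [List.filter_cons]
      rw [if_neg (by simp [hne])]
      exact ih hnd.2 h

-- a Set.update by elements already present is the identity
lemma set_update_self (s xs : List String) (h : ∀ x ∈ xs, x ∈ s) : PySem.Set.update s xs = s := by
  rw [PySem.Set.update_eq_append_filter]
  have hf : (PySem.Set.ofList xs).filter (fun y => !PySem.Set.contains s y) = [] := by
    apply List.filter_eq_nil_iff.2
    intro y hy
    have hys : y ∈ s := h y ((PySem.Set.mem_ofList xs y).1 hy)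
    simpa using hys
  rw [hf]
  simp

-- one inner per-key append pass: getD at a present key appends exactly that column's value
lemma inner_getD (its : List (String × List Int)) (hnd : (its.map Prod.fst).Nodup)
    (k : String) (col : List Int) (hmem : (k, col) ∈ its) (n : Int)
    (dd : PySem.Dict String (List Int)) :
    (its.foldl (fun d1 kv => d1.modify kv.1 [] (fun l => l ++ [PySem.List.pyGetD kv.2 n 0])) dd).getD k []
      = dd.getD k [] ++ [PySem.List.pyGetD col n 0] := by
  have hrw : its.foldl (fun d1 kv => d1.modify kv.1 [] (fun l => l ++ [PySem.List.pyGetD kv.2 n 0])) dd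
      = (its.map (fun kv => (kv.1, PySem.List.pyGetD kv.2 n 0))).foldl
          (fun d1 p => d1.modify p.1 [] (fun l => l ++ [p.2])) dd := by
    rw [List.foldl_map]
  rw [hrw, PySem.Dict.getD_foldl_modify_append]
  have : (its.map (fun kv => (kv.1, PySem.List.pyGetD kv.2 n 0))).filter (fun p => p.1 == k)
      = [(k, PySem.List.pyGetD col n 0)] := by
    rw [List.filter_map]
    rw [show ((fun p : String × Int => p.1 == k) ∘ (fun kv : String × List Int => (kv.1, PySem.List.pyGetD kv.2 n 0))) = (fun p : String × List Int => p.1 == k) from rfl]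
    rw [filter_key_eq its k col hnd hmem]
    rfl
  rw [this]
  rfl

-- the inner pass keeps the key list unchanged when it already covers its's keys
lemma inner_keys (its : List (String × List Int)) (n : Int)
    (dd : PySem.Dict String (List Int)) (hk : dd.keys = its.map Prod.fst) :
    (its.foldl (fun d1 kv => d1.modify kv.1 [] (fun l => l ++ [PySem.List.pyGetD kv.2 n 0])) dd).keys
      = its.map Prod.fst := by
  rw [PySem.Dict.keys_foldl_modify_key]
  rw [hk]
  exact set_update_self _ _ (fun x hx => hx)

-- the row loop: getD at each present key accumulates exactly the filtered rows' values
lemma rowfold (its : List (String × List Int)) (t1 : List Int) (value : Int)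
    (hnd : (its.map Prod.fst).Nodup) (k : String) (col : List Int) (hmem : (k, col) ∈ its) :
    ∀ (rows : List Int) (d1 d2 : PySem.Dict String (List Int)),
      d1.keys = its.map Prod.fst → d2.keys = its.map Prod.fst →
      (rows.foldl
        (fun (p : PySem.Dict String (List Int) × PySem.Dict String (List Int)) n =>
          if PySem.List.pyGetD t1 n 0 ≤ value then
            (its.foldl (fun d1 kv => d1.modify kv.1 [] (fun l => l ++ [PySem.List.pyGetD kv.2 n 0])) p.1, p.2)
          else
            (p.1, its.foldl (fun d2 kv => d2.modify kv.1 [] (fun l => l ++ [PySem.List.pyGetD kv.2 n 0])) p.2))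
        (d1, d2)).1.getD k []
        = d1.getD k [] ++ (rows.filter (fun n => decide (PySem.List.pyGetD t1 n 0 ≤ value))).map (fun n => PySem.List.pyGetD col n 0)
      ∧ (rows.foldl
        (fun (p : PySem.Dict String (List Int) × PySem.Dict String (List Int)) n =>
          if PySem.List.pyGetD t1 n 0 ≤ value then
            (its.foldl (fun d1 kv => d1.modify kv.1 [] (fun l => l ++ [PySem.List.pyGetD kv.2 n 0])) p.1, p.2)
          else
            (p.1, its.foldl (fun d2 kv => d2.modify kv.1 [] (fun l => l ++ [PySem.List.pyGetD kv.2 n 0])) p.2))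
        (d1, d2)).2.getD k []
        = d2.getD k [] ++ (rows.filter (fun n => decide (value < PySem.List.pyGetD t1 n 0))).map (fun n => PySem.List.pyGetD col n 0) := by
  intro rows
  induction rows with
  | nil => intro d1 d2 h1 h2; simp
  | cons r rs ih =>
    intro d1 d2 h1 h2
    simp only [List.foldl_cons, List.filter_cons]
    by_cases hc : PySem.List.pyGetD t1 r 0 ≤ value
    · rw [if_pos hc]
      have hk1 := inner_keys its r d1 h1
      obtain ⟨e1, e2⟩ := ih (its.foldl (fun d1 kv => d1.modify kv.1 [] (fun l => l ++ [PySem.List.pyGetD kv.2 r 0])) d1) d2 hk1 h2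
      constructor
      · rw [e1, inner_getD its hnd k col hmem r d1]
        simp [hc]
      · rw [e2]
        simp [not_lt.2 hc]
    · rw [if_neg hc]
      have hk2 := inner_keys its r d2 h2
      obtain ⟨e1, e2⟩ := ih d1 (its.foldl (fun d2 kv => d2.modify kv.1 [] (fun l => l ++ [PySem.List.pyGetD kv.2 r 0])) d2) h1 hk2
      constructor
      · rw [e1]
        simp [hc]
      · rw [e2, inner_getD its hnd k col hmem r d2]
        simp [lt_of_not_ge hc]

-- the row loop also keeps both key lists unchanged
lemma rowfold_keys (its : List (String × List Int)) (t1 : List Int) (value : Int) :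
    ∀ (rows : List Int) (d1 d2 : PySem.Dict String (List Int)),
      d1.keys = its.map Prod.fst → d2.keys = its.map Prod.fst →
      (rows.foldl
        (fun (p : PySem.Dict String (List Int) × PySem.Dict String (List Int)) n =>
          if PySem.List.pyGetD t1 n 0 ≤ value then
            (its.foldl (fun d1 kv => d1.modify kv.1 [] (fun l => l ++ [PySem.List.pyGetD kv.2 n 0])) p.1, p.2)
          else
            (p.1, its.foldl (fun d2 kv => d2.modify kv.1 [] (fun l => l ++ [PySem.List.pyGetD kv.2 n 0])) p.2))
        (d1, d2)).1.keys = its.map Prod.fst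
      ∧ (rows.foldl
        (fun (p : PySem.Dict String (List Int) × PySem.Dict String (List Int)) n =>
          if PySem.List.pyGetD t1 n 0 ≤ value then
            (its.foldl (fun d1 kv => d1.modify kv.1 [] (fun l => l ++ [PySem.List.pyGetD kv.2 n 0])) p.1, p.2)
          else
            (p.1, its.foldl (fun d2 kv => d2.modify kv.1 [] (fun l => l ++ [PySem.List.pyGetD kv.2 n 0])) p.2))
        (d1, d2)).2.keys = its.map Prod.fst := by
  intro rows
  induction rows with
  | nil => intro d1 d2 h1 h2; exact ⟨h1, h2⟩
  | cons r rs ih =>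
    intro d1 d2 h1 h2
    simp only [List.foldl_cons]
    by_cases hc : PySem.List.pyGetD t1 r 0 ≤ value
    · rw [if_pos hc]; exact ih _ _ (inner_keys its r d1 h1) h2
    · rw [if_neg hc]; exact ih _ _ h1 (inner_keys its r d2 h2)

-- the init loop: inserting [] for every key of its from empty
lemma init_items (its : List (String × List Int)) (hnd : (its.map Prod.fst).Nodup) :
    (its.foldl (fun d1 kv => d1.insert kv.1 ([] : List Int)) PySem.Dict.empty).items
      = its.map (fun kv => (kv.1, ([] : List Int))) := by
  have := PySem.Dict.items_foldl_insert_fresh (l := its) (k := Prod.fst)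
    (v := fun _ => ([] : List Int)) (d := PySem.Dict.empty)
    (by intro a _; simp [PySem.Dict.contains_empty]) hnd
  simpa using this

lemma init_keys (its : List (String × List Int)) (hnd : (its.map Prod.fst).Nodup) :
    (its.foldl (fun d1 kv => d1.insert kv.1 ([] : List Int)) PySem.Dict.empty).keys
      = its.map Prod.fst := by
  simp [PySem.Dict.keys, init_items its hnd, List.map_map, Function.comp]

lemma init_getD (its : List (String × List Int)) (hnd : (its.map Prod.fst).Nodup)
    (k : String) (col : List Int) (hmem : (k, col) ∈ its) :
    (its.foldl (fun d1 kv => d1.insert kv.1 ([] : List Int)) PySem.Dict.empty).getD k [] = [] := by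
  apply PySem.Dict.getD_of_mem_items
  · rw [init_items its hnd]
    exact List.mem_map_of_mem hmem
  · rw [PySem.Dict.keys, init_items its hnd, List.map_map]
    exact hnd

-- B's index lists are the filtered row ranges
lemma idx1_eq (t1 : List Int) (value : Int) :
    (((PySem.List.enumerate t1).filter (fun q => q.2 ≤ value)).map (·.1))
      = (PySem.List.pyRange 0 (t1.length : Int) 1).filter (fun n => decide (PySem.List.pyGetD t1 n 0 ≤ value)) := by
  rw [PySem.List.enumerate_eq_map_pyRange (d := 0), List.filter_map, List.map_map]
  rw [show ((fun q : Int × Int => decide (q.2 ≤ value)) ∘ (fun j : Int => (j, PySem.List.pyGetD t1 j 0))) = (fun n : Int => decide (PySem.List.pyGetD t1 n 0 ≤ value)) from rfl]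
  rw [show ((fun x : Int × Int => x.1) ∘ (fun j : Int => (j, PySem.List.pyGetD t1 j 0))) = (fun j : Int => j) from rfl]
  simp

lemma idx2_eq (t1 : List Int) (value : Int) :
    (((PySem.List.enumerate t1).filter (fun q => value < q.2)).map (·.1))
      = (PySem.List.pyRange 0 (t1.length : Int) 1).filter (fun n => decide (value < PySem.List.pyGetD t1 n 0)) := by
  rw [PySem.List.enumerate_eq_map_pyRange (d := 0), List.filter_map, List.map_map]
  rw [show ((fun q : Int × Int => decide (value < q.2)) ∘ (fun j : Int => (j, PySem.List.pyGetD t1 j 0))) = (fun n : Int => decide (value < PySem.List.pyGetD t1 n 0)) from rfl]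
  rw [show ((fun x : Int × Int => x.1) ∘ (fun j : Int => (j, PySem.List.pyGetD t1 j 0))) = (fun j : Int => j) from rfl]
  simp

-- ===== VERDICT (by name: the statement is the Claim_ definition above) =====
theorem split_by_value_spec : Claim_equal_split_by_value := by
  intro data value _ _
  unfold Spec_split_by_value split_by_value split_by_value_alt
  simp only []
  set d := PySem.Dict.ofList data with hd
  set t1 : List Int := (d.get? "t1").getD [] with ht1
  have hnd : (d.items.map Prod.fst).Nodup := PySem.Dict.nodup_keys_ofList data
  have hik := init_keys d.items hnd
  have hkeys := rowfold_keys d.items t1 value (PySem.List.pyRange 0 (t1.length : Int) 1) _ _ hik hik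
  -- name the loop result
  set res := (PySem.List.pyRange 0 (t1.length : Int) 1).foldl
      (fun (p : PySem.Dict String (List Int) × PySem.Dict String (List Int)) n =>
        if PySem.List.pyGetD t1 n 0 ≤ value then
          (d.items.foldl (fun d1 kv => d1.modify kv.1 [] (fun l => l ++ [PySem.List.pyGetD kv.2 n 0])) p.1, p.2)
        else
          (p.1, d.items.foldl (fun d2 kv => d2.modify kv.1 [] (fun l => l ++ [PySem.List.pyGetD kv.2 n 0])) p.2))
      (d.items.foldl (fun d1 kv => d1.insert kv.1 ([] : List Int)) PySem.Dict.empty,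
       d.items.foldl (fun d2 kv => d2.insert kv.1 ([] : List Int)) PySem.Dict.empty) with hres
  have hrows1 : res.1.items = d.items.map (fun kv => (kv.1,
      (((PySem.List.enumerate t1).filter (fun p => p.2 ≤ value)).map (·.1)).map
        (fun i => PySem.List.pyGetD kv.2 i 0))) := by
    rw [PySem.Dict.items_eq_map_keys res.1 (by rw [hkeys.1]; exact hnd) []]
    rw [hkeys.1, List.map_map]
    apply List.map_congr_left
    intro kv hkv
    have hrf := rowfold d.items t1 value hnd kv.1 kv.2 hkv
      (PySem.List.pyRange 0 (t1.length : Int) 1) _ _ hik hik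
    rw [← hres] at hrf
    show (kv.1, res.1.getD kv.1 []) = _
    rw [hrf.1, init_getD d.items hnd kv.1 kv.2 hkv, idx1_eq t1 value]
    simp
  have hrows2 : res.2.items = d.items.map (fun kv => (kv.1,
      (((PySem.List.enumerate t1).filter (fun p => value < p.2)).map (·.1)).map
        (fun i => PySem.List.pyGetD kv.2 i 0))) := by
    rw [PySem.Dict.items_eq_map_keys res.2 (by rw [hkeys.2]; exact hnd) []]
    rw [hkeys.2, List.map_map]
    apply List.map_congr_left
    intro kv hkv
    have hrf := rowfold d.items t1 value hnd kv.1 kv.2 hkv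
      (PySem.List.pyRange 0 (t1.length : Int) 1) _ _ hik hik
    rw [← hres] at hrf
    show (kv.1, res.2.getD kv.1 []) = _
    rw [hrf.2, init_getD d.items hnd kv.1 kv.2 hkv, idx2_eq t1 value]
    simp
  exact Prod.ext hrows1 hrows2
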